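-- pv_equiv track=rewrite | github.com/CodeCLS/PatentGeneratorThesis | SentenceSplitter.py | _split_on_markers
-- ===== SOURCE A (Python) =====
-- from typing import List, Tuple
--
-- def _split_on_markers(s: str, markers: set) -> List[str]:
--     # Split at markers as standalone tokens, transfer marker to the beginning of next clause
--     tokens = s.split()
--     indices = [i for i, t in enumerate(tokens) if t.lower() in markers]
--     if not indices:
--         return [s]
--
--     parts, start = [], 0
--     for idx in indices:
--         left = " ".join(tokens[start:idx]).strip()
--         if left:
--             parts.append(left)
--         start = idx
--     tail = " ".join(tokens[start:]).strip()
--     if tail: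
--         parts.append(tail)
--     return parts
-- ===== SOURCE B (Python) =====
-- from typing import List
--
-- def _split_on_markers(s: str, markers: set) -> List[str]:
--     # Single streaming pass with an accumulator instead of precomputing marker indices and slicing.
--     tokens = s.split()
--     if not any(t.lower() in markers for t in tokens):
--         return [s]
--     parts, current = [], []
--     for token in tokens:
--         if token.lower() in markers:
--             piece = " ".join(current).strip()
--             if piece:
--                 parts.append(piece)
--             current = [token]
--         else:
--             current.append(token)
--     piece = " ".join(current).strip()
--     if piece:
--         parts.append(piece)
--     return parts
-- ===== Notes on version B (the rewrite author's own statement) =====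
-- stated objective: alternative
-- what changed: Replaced A's two-phase algorithm (precompute the list of marker indices, then loop over index pairs slicing the token list) by a single streaming pass that maintains a 'current clause' accumulator, flushing it at each marker token.
import Mathlib
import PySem

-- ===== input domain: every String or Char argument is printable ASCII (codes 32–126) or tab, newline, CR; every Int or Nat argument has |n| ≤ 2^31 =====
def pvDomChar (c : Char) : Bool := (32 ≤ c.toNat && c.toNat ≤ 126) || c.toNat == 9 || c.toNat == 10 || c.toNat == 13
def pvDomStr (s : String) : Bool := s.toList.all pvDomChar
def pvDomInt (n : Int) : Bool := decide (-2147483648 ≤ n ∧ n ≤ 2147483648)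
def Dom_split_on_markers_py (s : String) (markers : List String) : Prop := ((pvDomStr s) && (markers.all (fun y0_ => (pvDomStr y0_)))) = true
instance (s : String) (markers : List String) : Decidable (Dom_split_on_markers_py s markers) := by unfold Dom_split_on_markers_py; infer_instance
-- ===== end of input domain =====

-- B replaces A's marker-index precomputation + slice loop by one streaming accumulator pass; alternative decomposition, same cost.

-- ===== PORT A =====
def split_on_markers_py (s : String) (markers : List String) : List String :=
  let tokens := PySem.Str.split₀ s
  let indices := ((PySem.List.enumerate tokens 0).filter
      (fun p => markers.contains (PySem.Str.lower p.2))).map (·.1)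
  if indices = [] then [s]
  else
    let r := indices.foldl (fun (acc : List String × Int) idx =>
        let left := PySem.Str.strip (PySem.Str.join " " (PySem.List.slice tokens (some acc.2) (some idx)))
        (if left ≠ "" then acc.1 ++ [left] else acc.1, idx)) ([], 0)
    let tail := PySem.Str.strip (PySem.Str.join " " (PySem.List.slice tokens (some r.2) none))
    if tail ≠ "" then r.1 ++ [tail] else r.1

-- ===== PORT B =====
def split_on_markers_py_alt (s : String) (markers : List String) : List String :=
  let tokens := PySem.Str.split₀ s
  if !(tokens.any (fun t => markers.contains (PySem.Str.lower t))) then [s]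
  else
    let r := tokens.foldl (fun (acc : List String × List String) token =>
        if markers.contains (PySem.Str.lower token) then
          let piece := PySem.Str.strip (PySem.Str.join " " acc.2)
          (if piece ≠ "" then acc.1 ++ [piece] else acc.1, [token])
        else (acc.1, acc.2 ++ [token])) ([], [])
    let piece := PySem.Str.strip (PySem.Str.join " " r.2)
    if piece ≠ "" then r.1 ++ [piece] else r.1

-- ===== PRECONDITION & SPEC =====
def Spec_split_on_markers_py (s : String) (markers : List String) (out : List String) : Prop := out = split_on_markers_py_alt s markers
instance (s : String) (markers : List String) (out : List String) : Decidable (Spec_split_on_markers_py s markers out) := by unfold Spec_split_on_markers_py; infer_instance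

-- ===== CLAIM (what is proved, stated in full; the proofs are below) =====
def Claim_equal_split_on_markers_py : Prop := ∀ (s : String) (markers : List String), Dom_split_on_markers_py s markers → Spec_split_on_markers_py s markers (split_on_markers_py s markers)

-- ===== LEMMAS AND PROOFS =====

-- shared "flush the current clause" operation (identical in both ports)
def pvEmit (parts cur : List String) : List String :=
  let p := PySem.Str.strip (PySem.Str.join " " cur)
  if p ≠ "" then parts ++ [p] else parts

def pvStepA (tokens : List String) (acc : List String × Int) (idx : Int) : List String × Int :=
  let left := PySem.Str.strip (PySem.Str.join " " (PySem.List.slice tokens (some acc.2) (some idx)))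
  (if left ≠ "" then acc.1 ++ [left] else acc.1, idx)

def pvStepB (markers : List String) (acc : List String × List String) (token : String) :
    List String × List String :=
  if markers.contains (PySem.Str.lower token) then
    let piece := PySem.Str.strip (PySem.Str.join " " acc.2)
    (if piece ≠ "" then acc.1 ++ [piece] else acc.1, [token])
  else (acc.1, acc.2 ++ [token])

def pvIdx (markers tokens' : List String) (n : Int) : List Int :=
  ((PySem.List.enumerate tokens' n).filter
      (fun p => markers.contains (PySem.Str.lower p.2))).map (·.1)

def pvArun (markers tokens : List String) (parts : List String) (st n : Nat) : List String :=
  let r := (pvIdx markers (tokens.drop n) (n : Int)).foldl (pvStepA tokens) (parts, (st : Int))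
  pvEmit r.1 (PySem.List.slice tokens (some r.2) none)

def pvBrun (markers rest parts cur : List String) : List String :=
  let r := rest.foldl (pvStepB markers) (parts, cur)
  pvEmit r.1 r.2

lemma pvStepA_emit (tokens : List String) (acc : List String × Int) (idx : Int) :
    pvStepA tokens acc idx
      = (pvEmit acc.1 (PySem.List.slice tokens (some acc.2) (some idx)), idx) := rfl

lemma pvIdx_nil (markers : List String) (n : Int) : pvIdx markers [] n = [] := rfl

lemma pvIdx_cons (markers : List String) (t : String) (ts : List String) (n : Int) :
    pvIdx markers (t :: ts) n
      = (if markers.contains (PySem.Str.lower t) then [n] else []) ++ pvIdx markers ts (n + 1) := by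
  simp only [pvIdx, PySem.List.enumerate_cons, List.filter_cons]
  split_ifs <;> simp

lemma pvCore (markers tokens : List String) :
    ∀ (k n st : Nat) (parts : List String), tokens.length - n ≤ k → st ≤ n →
      pvBrun markers (tokens.drop n) parts ((tokens.drop st).take (n - st))
        = pvArun markers tokens parts st n := by
  intro k
  induction k with
  | zero =>
    intro n st parts hk hst
    have hlen : tokens.length ≤ n := by omega
    have hdrop : tokens.drop n = [] := List.drop_eq_nil_of_le hlen
    have htake : (tokens.drop st).take (n - st) = tokens.drop st := by
      apply List.take_of_length_le
      simp [List.length_drop]; omega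
    simp only [pvBrun, pvArun, hdrop, htake, pvIdx_nil, List.foldl_nil]
    rw [PySem.List.slice_from_natCast]
  | succ k ih =>
    intro n st parts hk hst
    by_cases hn : tokens.length ≤ n
    · -- same as base case
      have hdrop : tokens.drop n = [] := List.drop_eq_nil_of_le hn
      have htake : (tokens.drop st).take (n - st) = tokens.drop st := by
        apply List.take_of_length_le
        simp [List.length_drop]; omega
      simp only [pvBrun, pvArun, hdrop, htake, pvIdx_nil, List.foldl_nil]
      rw [PySem.List.slice_from_natCast]
    · rw [not_le] at hn
      have hdrop : tokens.drop n = tokens[n] :: tokens.drop (n + 1) :=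
        List.drop_eq_getElem_cons hn
      have hcast : (n : Int) + 1 = ((n + 1 : Nat) : Int) := by push_cast; ring
      have hcur : (tokens.drop st).take (n - st) ++ [tokens[n]]
          = (tokens.drop st).take (n + 1 - st) := by
        have hlt : n - st < (tokens.drop st).length := by
          simp [List.length_drop]; omega
        have : n + 1 - st = (n - st) + 1 := by omega
        rw [this, List.take_add_one, List.getElem?_eq_getElem hlt]
        simp [List.getElem_drop, Nat.add_sub_cancel' hst]
      by_cases hm : markers.contains (PySem.Str.lower tokens[n])
      · -- marker at position n: flush and restart
        have hm' : PySem.Str.lower tokens[n] ∈ markers := by simpa using hm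
        have hsingle : [tokens[n]] = (tokens.drop n).take (n + 1 - n) := by
          rw [hdrop, Nat.add_sub_cancel_left]; rfl
        have hslice : PySem.List.slice tokens (some (st : Int)) (some (n : Int))
            = (tokens.drop st).take (n - st) := PySem.List.slice_natCast tokens st n
        calc pvBrun markers (tokens.drop n) parts ((tokens.drop st).take (n - st))
            = pvBrun markers (tokens.drop (n + 1))
                (pvEmit parts ((tokens.drop st).take (n - st))) [tokens[n]] := by
              simp only [pvBrun, hdrop, List.foldl_cons, pvStepB, hm, if_pos, pvEmit]
          _ = pvBrun markers (tokens.drop (n + 1))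
                (pvEmit parts ((tokens.drop st).take (n - st)))
                ((tokens.drop n).take (n + 1 - n)) := by rw [hsingle]
          _ = pvArun markers tokens (pvEmit parts ((tokens.drop st).take (n - st))) n (n + 1) := by
              apply ih <;> omega
          _ = pvArun markers tokens parts st n := by
              simp only [pvArun, hdrop, pvIdx_cons, hm, List.singleton_append,
                List.foldl_cons, pvStepA_emit, hslice, hcast, if_pos]
      · -- ordinary token: extend the current clause
        have hm' : PySem.Str.lower tokens[n] ∉ markers := by simpa using hm
        calc pvBrun markers (tokens.drop n) parts ((tokens.drop st).take (n - st))
            = pvBrun markers (tokens.drop (n + 1)) parts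
                ((tokens.drop st).take (n - st) ++ [tokens[n]]) := by
              simp only [pvBrun, hdrop, List.foldl_cons, pvStepB]
              simp [hm']
          _ = pvBrun markers (tokens.drop (n + 1)) parts ((tokens.drop st).take (n + 1 - st)) := by
              rw [hcur]
          _ = pvArun markers tokens parts st (n + 1) := by apply ih <;> omega
          _ = pvArun markers tokens parts st n := by
              simp only [pvArun, hdrop, pvIdx_cons, hcast]
              simp [hm']

lemma pvGuard (markers tokens : List String) :
    (pvIdx markers tokens 0 = []) ↔ (tokens.any (fun t => markers.contains (PySem.Str.lower t)) = false) := by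
  simp only [pvIdx, List.map_eq_nil_iff, List.filter_eq_nil_iff, List.any_eq_false]
  constructor
  · intro h x hx
    have : x ∈ (PySem.List.enumerate tokens (0 : Int)).map (·.2) := by
      rw [PySem.List.map_snd_enumerate]; exact hx
    obtain ⟨p, hp, hpx⟩ := List.mem_map.mp this
    have := h p hp
    simpa [hpx] using this
  · intro h p hp
    have hmem : p.2 ∈ tokens := by
      rw [← PySem.List.map_snd_enumerate tokens (0 : Int)]
      exact List.mem_map.mpr ⟨p, hp, rfl⟩
    simpa using h p.2 hmem

lemma portA_eq (s : String) (markers : List String) :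
    split_on_markers_py s markers
      = (if pvIdx markers (PySem.Str.split₀ s) 0 = [] then [s]
         else pvArun markers (PySem.Str.split₀ s) [] 0 0) := rfl

lemma portB_eq (s : String) (markers : List String) :
    split_on_markers_py_alt s markers
      = (if !((PySem.Str.split₀ s).any (fun t => markers.contains (PySem.Str.lower t))) then [s]
         else pvBrun markers (PySem.Str.split₀ s) [] []) := rfl

-- ===== VERDICT (by name: the statement is the Claim_ definition above) =====
theorem split_on_markers_py_spec : Claim_equal_split_on_markers_py := by
  intro s markers _
  unfold Spec_split_on_markers_py
  rw [portA_eq, portB_eq]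
  set tokens := PySem.Str.split₀ s with htok
  by_cases hg : pvIdx markers tokens 0 = []
  · rw [if_pos hg, if_pos]
    simpa [List.any_eq_false] using (pvGuard markers tokens).mp hg
  · rw [if_neg hg]
    have hany : tokens.any (fun t => markers.contains (PySem.Str.lower t)) = true := by
      by_contra h
      exact hg ((pvGuard markers tokens).mpr (by simpa using h))
    rw [if_neg (by simpa using hany)]
    have := pvCore markers tokens tokens.length 0 0 [] (by omega) (by omega)
    simpa using this.symm
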